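-- pv_equiv track=rewrite | github.com/odobon1/biocosmos | preprocessing/bryo/class_data_phylo.py | group_by_genus
-- ===== SOURCE A (Python) =====
-- def group_by_genus(species_names):
--     """
--     Convert a list like:
--         ['adeona_japonica', 'adeona_sp1', 'adeonella_calveti']
--     into:
--         {
--             'adeona': ['adeona_japonica', 'adeona_sp1'],
--             'adeonella': ['adeonella_calveti']
--         }
--
--     Assumes the genus is the part before the first underscore.
--     """
--     grouped = {}
--
--     for name in species_names:
--         genus = name.split("_", 1)[0]
--         if genus not in grouped:
--             grouped[genus] = []
--         grouped[genus].append(name)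
--
--     return grouped
-- ===== SOURCE B (Python) =====
-- def group_by_genus(species_names):
--     def genus(name):
--         return name.split("_", 1)[0]
--
--     genera = dict.fromkeys(genus(name) for name in species_names)
--     return {g: [name for name in species_names if genus(name) == g]
--             for g in genera}
-- ===== Notes on version B (the rewrite author's own statement) =====
-- stated objective: alternative
-- what changed: B replaces A's single dict-accumulation loop by a two-pass scheme: an ordered dedup of the genus keys (dict.fromkeys) followed by one filter pass over the input per genus.
import Mathlib
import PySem

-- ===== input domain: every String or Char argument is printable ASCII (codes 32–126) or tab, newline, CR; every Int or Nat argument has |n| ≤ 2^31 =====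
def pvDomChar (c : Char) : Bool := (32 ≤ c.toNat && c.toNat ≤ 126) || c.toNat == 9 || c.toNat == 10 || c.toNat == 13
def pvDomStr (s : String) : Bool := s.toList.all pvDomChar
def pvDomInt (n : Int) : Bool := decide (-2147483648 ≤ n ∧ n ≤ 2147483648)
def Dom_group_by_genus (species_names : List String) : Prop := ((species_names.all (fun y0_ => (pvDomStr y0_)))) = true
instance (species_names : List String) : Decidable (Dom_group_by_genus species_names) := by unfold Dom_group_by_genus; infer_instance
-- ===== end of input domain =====

-- B replaces A's dict-accumulation loop by an ordered dedup of the genus keys followed by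
-- one filter pass per genus (objective: alternative, same results, not faster).

-- name.split("_", 1)[0]: split never returns an empty list, so the [0] never raises;
-- headD "" is exact here (used by both ports — both Pythons compute this same expression).
def genusOf (name : String) : String :=
  ((PySem.Str.splitMax? name "_" 1).getD []).headD ""

-- ===== PORT A =====
def group_by_genus (species_names : List String) : List (String × List String) :=
  (species_names.foldl
    (fun grouped name =>
      let genus := genusOf name
      let grouped := if grouped.contains genus then grouped else grouped.insert genus []
      grouped.modify genus [] (· ++ [name]))
    PySem.Dict.empty).items

-- ===== PORT B =====
def group_by_genus_alt (species_names : List String) : List (String × List String) :=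
  let genera := PySem.List.dedup (species_names.map genusOf)
  genera.map (fun g => (g, species_names.filter (fun name => genusOf name == g)))

-- ===== PRECONDITION & SPEC =====
def Spec_group_by_genus (species_names : List String) (out : List (String × List String)) : Prop := out = group_by_genus_alt species_names
instance (species_names : List String) (out : List (String × List String)) : Decidable (Spec_group_by_genus species_names out) := by unfold Spec_group_by_genus; infer_instance

-- ===== CLAIM (what is proved, stated in full; the proofs are below) =====
def Claim_equal_group_by_genus : Prop := ∀ (species_names : List String), Dom_group_by_genus species_names → Spec_group_by_genus species_names (group_by_genus species_names)

-- ===== LEMMAS AND PROOFS =====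

-- A's loop body ("insert [] if new, then append") equals a single modify-with-default.
theorem group_step_eq (d : PySem.Dict String (List String)) (name : String) :
    (let genus := genusOf name
     let d' := if d.contains genus then d else d.insert genus []
     d'.modify genus [] (· ++ [name])) = d.modify (genusOf name) [] (· ++ [name]) := by
  simp only []
  split_ifs with h
  · rfl
  · have hc : d.contains (genusOf name) = false := by simpa using h
    apply PySem.Dict.ext
    simp [PySem.Dict.modify, PySem.Dict.insert_insert_self, PySem.Dict.getD_insert_self,
      PySem.Dict.getD_of_not_contains d [] hc,
      PySem.Dict.items_insert_of_not_contains, hc]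

theorem group_by_genus_eq_alt (species_names : List String) :
    group_by_genus species_names = group_by_genus_alt species_names := by
  unfold group_by_genus group_by_genus_alt
  have hfold : species_names.foldl
      (fun grouped name =>
        let genus := genusOf name
        let grouped := if grouped.contains genus then grouped else grouped.insert genus []
        grouped.modify genus [] (· ++ [name]))
      PySem.Dict.empty
      = (species_names.map (fun n => (genusOf n, n))).foldl
          (fun d p => d.modify p.1 [] (· ++ [p.2])) PySem.Dict.empty := by
    rw [List.foldl_map]
    exact PySem.List.foldl_congr_mem _ _ _ _ (fun d n _ => group_step_eq d n)
  rw [hfold]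
  set L := species_names.map (fun n => (genusOf n, n)) with hL
  have hnodup : ((L.foldl (fun d p => d.modify p.1 [] (· ++ [p.2])) PySem.Dict.empty)).keys.Nodup := by
    exact PySem.Dict.nodup_keys_foldl_modify_key L Prod.fst [] (fun _ p => (· ++ [p.2])) _ (by simp)
  have hkeys : ((L.foldl (fun d p => d.modify p.1 [] (· ++ [p.2])) PySem.Dict.empty)).keys
      = PySem.List.dedup (species_names.map genusOf) := by
    have := PySem.Dict.keys_foldl_modify_key L Prod.fst [] (fun _ p => (· ++ [p.2])) PySem.Dict.empty
    simp at this
    rw [this, hL]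
    simp [List.map_map, PySem.Set.update_nil_left]
    rfl
  rw [PySem.Dict.items_eq_map_keys _ hnodup [], hkeys]
  apply List.map_congr_left
  intro g hg
  have hgetD := PySem.Dict.getD_foldl_modify_append L PySem.Dict.empty g
  simp only [PySem.Dict.getD_empty] at hgetD
  rw [hgetD]
  simp [hL, List.filter_map, Function.comp_def]

-- ===== VERDICT (by name: the statement is the Claim_ definition above) =====
theorem group_by_genus_spec : Claim_equal_group_by_genus := by
  intro species_names _
  unfold Spec_group_by_genus
  exact group_by_genus_eq_alt species_names
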